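-- pv_equiv track=rewrite | github.com/openstenoproject/plover | plover/machine/stenograph.py | process_steno_packet
-- ===== SOURCE A (Python) =====
-- STENO_KEY_CHART = (('^', '#', 'S-', 'T-', 'K-', 'P-'),
--                    ('W-', 'H-', 'R-', 'A-', 'O-', '*'),
--                    ('-E', '-U', '-F', '-R', '-P', '-B'),
--                    ('-L', '-G', '-T', '-S', '-D', '-Z'),
--                   )
--
-- def process_steno_packet(steno):
--     # Expecting 8 byte chords.
--     # Bytes 0-3 are steno, 4-7 are timestamp.
--     chords = []
--     for chord_index in range(len(steno) // 8):
--         keys = []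
--         chord = steno[chord_index * 8: chord_index * 8 + 4]
--         for byte_number, byte in enumerate(chord):
--             if byte is None:
--                 continue
--             byte_keys = STENO_KEY_CHART[byte_number]
--             for i in range(6):
--                 if (byte >> i) & 1:
--                     key = byte_keys[-i + 5]
--                     if key:
--                         keys.append(key)
--         if keys:
--             chords.append(keys)
--     return chords
-- ===== SOURCE B (Python) =====
-- STENO_KEY_CHART = (('^', '#', 'S-', 'T-', 'K-', 'P-'),
--                    ('W-', 'H-', 'R-', 'A-', 'O-', '*'),
--                    ('-E', '-U', '-F', '-R', '-P', '-B'),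
--                    ('-L', '-G', '-T', '-S', '-D', '-Z'),
--                   )
--
-- def _row_table(row):
--     # entry for each 6-bit value v: keys appended for set bits i=0..5, key = row[5-i]
--     return [[row[5 - i] for i in range(6) if (v >> i) & 1 and row[5 - i]]
--             for v in range(64)]
--
-- _TABLES = [_row_table(row) for row in STENO_KEY_CHART]
--
-- def process_steno_packet(steno):
--     chords = []
--     for k in range(len(steno) // 8):
--         keys = []
--         for pos in range(4):
--             byte = steno[8 * k + pos]
--             if byte is not None:
--                 keys += _TABLES[pos][byte & 0x3F]
--         if keys:
--             chords.append(keys)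
--     return chords
-- ===== Notes on version B (the rewrite author's own statement) =====
-- stated objective: faster
-- what changed: Replaces A's per-byte inner loop over 6 bits (shift, test, negative-offset index, emptiness check per bit) with four 64-entry key-list tables precomputed once at module load and indexed by byte & 0x3F.
import Mathlib
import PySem

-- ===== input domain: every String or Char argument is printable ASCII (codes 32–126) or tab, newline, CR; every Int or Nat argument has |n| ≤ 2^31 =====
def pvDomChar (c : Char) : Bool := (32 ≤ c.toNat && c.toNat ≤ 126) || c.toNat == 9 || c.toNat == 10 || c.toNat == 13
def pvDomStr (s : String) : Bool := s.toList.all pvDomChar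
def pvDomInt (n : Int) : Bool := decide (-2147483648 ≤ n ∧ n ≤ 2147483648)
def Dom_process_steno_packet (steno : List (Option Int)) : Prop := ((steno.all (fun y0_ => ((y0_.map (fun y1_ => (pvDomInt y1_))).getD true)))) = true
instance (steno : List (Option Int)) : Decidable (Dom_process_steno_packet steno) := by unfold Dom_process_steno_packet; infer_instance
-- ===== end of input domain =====

-- B replaces A's per-bit inner scan by four precomputed 64-entry key-list tables indexed by byte & 0x3F (constant-factor speedup per byte).

-- ===== PORT A =====
def STENO_KEY_CHART : List (List String) :=
  [["^", "#", "S-", "T-", "K-", "P-"],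
   ["W-", "H-", "R-", "A-", "O-", "*"],
   ["-E", "-U", "-F", "-R", "-P", "-B"],
   ["-L", "-G", "-T", "-S", "-D", "-Z"]]

-- A's inner `for i in range(6)` loop; Python `(byte >> i) & 1` is floor division by 2^i then mod 2 (exact for negative bytes too)
def pvByteA (byte : Int) (byte_keys : List String) (keys : List String) : List String :=
  (PySem.List.pyRange 0 6 1).foldl (fun keys i =>
    if PySem.Int.mod (PySem.Int.floordiv byte (2 ^ i.toNat)) 2 = 1 then
      let key := PySem.List.pyGetD byte_keys (-i + 5) ""
      if key ≠ "" then keys ++ [key] else keys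
    else keys) keys

-- A's body for one chord: keys collected over enumerate(chord)
def pvChordA (steno : List (Option Int)) (chord_index : Int) : List String :=
  (PySem.List.enumerate
      (PySem.List.slice steno (some (chord_index * 8)) (some (chord_index * 8 + 4))) 0).foldl
    (fun keys be =>
      match be.2 with
      | none => keys
      | some byte => pvByteA byte (PySem.List.pyGetD STENO_KEY_CHART be.1 []) keys) []

def process_steno_packet (steno : List (Option Int)) : List (List String) :=
  (PySem.List.pyRange 0 (PySem.Int.floordiv (steno.length : Int) 8) 1).foldl
    (fun chords chord_index =>
      let keys := pvChordA steno chord_index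
      if keys ≠ [] then chords ++ [keys] else chords) []

-- ===== PORT B =====
-- table row: for each 6-bit value v the ordered non-empty keys of its set bits
def pvRowTable (row : List String) : List (List String) :=
  (List.range 64).map (fun v =>
    ((List.range 6).filter (fun i => ((v >>> i) &&& 1 == 1) && (row.getD (5 - i) "" != ""))).map
      (fun i => row.getD (5 - i) ""))

def pvTables : List (List (List String)) := STENO_KEY_CHART.map pvRowTable

-- B's body for one chord: one table lookup per present byte (`byte & 0x3F` = mod 64)
def pvChordB (steno : List (Option Int)) (k : Nat) : List String :=
  (List.range 4).foldl (fun keys pos =>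
    match steno.getD (8 * k + pos) none with
    | none => keys
    | some byte => keys ++ (pvTables.getD pos []).getD (PySem.Int.mod byte 64).toNat []) []

def process_steno_packet_alt (steno : List (Option Int)) : List (List String) :=
  (List.range (steno.length / 8)).foldl (fun chords k =>
    let keys := pvChordB steno k
    if keys ≠ [] then chords ++ [keys] else chords) []

-- ===== PRECONDITION & SPEC =====
def Spec_process_steno_packet (steno : List (Option Int)) (out : List (List String)) : Prop := out = process_steno_packet_alt steno
instance (steno : List (Option Int)) (out : List (List String)) : Decidable (Spec_process_steno_packet steno out) := by unfold Spec_process_steno_packet; infer_instance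

-- ===== CLAIM (what is proved, stated in full; the proofs are below) =====
def Claim_equal_process_steno_packet : Prop := ∀ (steno : List (Option Int)), Dom_process_steno_packet steno → Spec_process_steno_packet steno (process_steno_packet steno)

-- ===== LEMMAS AND PROOFS =====

lemma pv_foldl_shift {α β : Type} (f : List α → β → List α)
    (h : ∀ acc x, f acc x = acc ++ f [] x) :
    ∀ (l : List β) (init : List α), l.foldl f init = init ++ l.foldl f [] := by
  intro l
  induction l with
  | nil => intro init; simp
  | cons x l ih =>
      intro init
      simp only [List.foldl_cons]
      rw [ih (f init x), ih (f [] x), h init x, List.append_assoc]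

lemma pvByteA_shift (byte : Int) (row keys : List String) :
    pvByteA byte row keys = keys ++ pvByteA byte row [] := by
  unfold pvByteA
  exact pv_foldl_shift _ (by intro acc i; dsimp only; split_ifs <;> simp) _ keys

lemma pv_bit (b : Int) (i : Nat) (hi : i < 6) :
    PySem.Int.mod (PySem.Int.floordiv b (2 ^ i)) 2
      = PySem.Int.mod (PySem.Int.floordiv (PySem.Int.mod b 64) (2 ^ i)) 2 := by
  have h2 : (0:Int) < 2 ^ i := by positivity
  rw [PySem.Int.mod_eq_emod_of_pos (by norm_num : (0:Int) < 64),
      PySem.Int.floordiv_eq_ediv_of_pos h2, PySem.Int.floordiv_eq_ediv_of_pos h2,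
      PySem.Int.mod_eq_emod_of_pos (by norm_num : (0:Int) < 2),
      PySem.Int.mod_eq_emod_of_pos (by norm_num : (0:Int) < 2)]
  interval_cases i <;> norm_num <;> omega

lemma pvByteA_mod (b : Int) (row : List String) :
    pvByteA b row [] = pvByteA (PySem.Int.mod b 64) row [] := by
  unfold pvByteA
  apply PySem.List.foldl_congr_mem
  intro acc i hi
  have hr : 0 ≤ i ∧ i < 6 := by
    have := (PySem.List.mem_pyRange_one).mp hi
    omega
  have hb := pv_bit b i.toNat (by omega)
  simp only [hb]

lemma pv_table_entry : ∀ pos : Fin 4, ∀ v : Fin 64,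
    pvByteA ((v.val : Nat) : Int) (PySem.List.pyGetD STENO_KEY_CHART ((pos.val : Nat) : Int) []) []
      = (pvTables.getD pos.val []).getD v.val [] := by decide

lemma pvByteA_table (b : Int) (pos : Nat) (hpos : pos < 4) (keys : List String) :
    pvByteA b (PySem.List.pyGetD STENO_KEY_CHART (pos : Int) []) keys
      = keys ++ (pvTables.getD pos []).getD (PySem.Int.mod b 64).toNat [] := by
  rw [pvByteA_shift, pvByteA_mod]
  have h0 : 0 ≤ PySem.Int.mod b 64 := by
    rw [PySem.Int.mod_eq_emod_of_pos (by norm_num : (0:Int) < 64)]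
    exact Int.emod_nonneg _ (by norm_num)
  have h1 : PySem.Int.mod b 64 < 64 := by
    rw [PySem.Int.mod_eq_emod_of_pos (by norm_num : (0:Int) < 64)]
    exact Int.emod_lt_of_pos _ (by norm_num)
  have hv : (PySem.Int.mod b 64).toNat < 64 := by omega
  have he : PySem.Int.mod b 64 = (((PySem.Int.mod b 64).toNat : Nat) : Int) := by omega
  rw [he]
  exact congrArg _ (pv_table_entry ⟨pos, hpos⟩ ⟨_, hv⟩)

lemma pvT0 (b : Int) (keys : List String) :
    pvByteA b (PySem.List.pyGetD STENO_KEY_CHART 0 []) keys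
      = keys ++ (pvTables.getD 0 []).getD (PySem.Int.mod b 64).toNat [] := by
  simpa using pvByteA_table b 0 (by omega) keys

lemma pvT1 (b : Int) (keys : List String) :
    pvByteA b (PySem.List.pyGetD STENO_KEY_CHART 1 []) keys
      = keys ++ (pvTables.getD 1 []).getD (PySem.Int.mod b 64).toNat [] := by
  simpa using pvByteA_table b 1 (by omega) keys

lemma pvT2 (b : Int) (keys : List String) :
    pvByteA b (PySem.List.pyGetD STENO_KEY_CHART 2 []) keys
      = keys ++ (pvTables.getD 2 []).getD (PySem.Int.mod b 64).toNat [] := by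
  simpa using pvByteA_table b 2 (by omega) keys

lemma pvT3 (b : Int) (keys : List String) :
    pvByteA b (PySem.List.pyGetD STENO_KEY_CHART 3 []) keys
      = keys ++ (pvTables.getD 3 []).getD (PySem.Int.mod b 64).toNat [] := by
  simpa using pvByteA_table b 3 (by omega) keys

lemma pv_take4 : ∀ (j : Nat) (xs : List (Option Int)), j + 4 ≤ xs.length →
    (xs.drop j).take 4
      = [xs.getD j none, xs.getD (j+1) none, xs.getD (j+2) none, xs.getD (j+3) none] := by
  intro j
  induction j with
  | zero =>
      intro xs h
      match xs, h with
      | x0 :: x1 :: x2 :: x3 :: rest, _ => simp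
  | succ j ih =>
      intro xs h
      match xs, h with
      | y :: ys, h =>
        have h' : j + 4 ≤ ys.length := by simp at h; omega
        simp only [List.drop_succ_cons]
        rw [ih ys h']
        simp [show j+1+1 = j+2 from rfl, show j+1+2 = j+3 from rfl, show j+1+3 = j+4 from rfl]

lemma pv_chord4 (x0 x1 x2 x3 : Option Int) :
    (PySem.List.enumerate [x0,x1,x2,x3] 0).foldl
      (fun keys be => match be.2 with
        | none => keys
        | some byte => pvByteA byte (PySem.List.pyGetD STENO_KEY_CHART be.1 []) keys) []
    = (List.range 4).foldl (fun keys pos =>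
        match [x0,x1,x2,x3].getD pos none with
        | none => keys
        | some byte => keys ++ (pvTables.getD pos []).getD (PySem.Int.mod byte 64).toNat []) [] := by
  rcases x0 with _ | b0 <;> rcases x1 with _ | b1 <;> rcases x2 with _ | b2 <;> rcases x3 with _ | b3 <;>
    simp [PySem.List.enumerate_cons, PySem.List.enumerate_nil, List.range_succ,
          pvT0, pvT1, pvT2, pvT3, List.append_assoc]

lemma pv_chord_eq (steno : List (Option Int)) (k : Nat) (h4 : 8 * k + 4 ≤ steno.length) :
    pvChordA steno (k : Int) = pvChordB steno k := by
  unfold pvChordA pvChordB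
  have hc : PySem.List.slice steno (some ((k:Int) * 8)) (some ((k:Int) * 8 + 4))
      = [steno.getD (8*k) none, steno.getD (8*k+1) none,
         steno.getD (8*k+2) none, steno.getD (8*k+3) none] := by
    have e1 : ((k:Int) * 8) = ((8*k : Nat) : Int) := by push_cast; ring
    rw [e1, show ((8*k : Nat) : Int) + 4 = ((8*k : Nat) : Int) + ((4 : Nat) : Int) from by norm_num,
        PySem.List.slice_natCast_add]
    exact pv_take4 (8*k) steno h4
  rw [hc, pv_chord4]
  apply PySem.List.foldl_congr_mem
  intro acc pos hpos
  have : pos < 4 := List.mem_range.mp hpos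
  interval_cases pos <;> simp

-- ===== VERDICT (by name: the statement is the Claim_ definition above) =====
theorem process_steno_packet_spec : Claim_equal_process_steno_packet := by
  intro steno _
  unfold Spec_process_steno_packet process_steno_packet process_steno_packet_alt
  rw [show PySem.Int.floordiv (steno.length : Int) 8 = ((steno.length / 8 : Nat) : Int) from by
        exact_mod_cast PySem.Int.floordiv_natCast steno.length 8,
      PySem.List.pyRange_zero_natCast, List.foldl_map]
  apply PySem.List.foldl_congr_mem
  intro acc k hk
  have hk' : k < steno.length / 8 := List.mem_range.mp hk
  have h4 : 8 * k + 4 ≤ steno.length := by omega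
  rw [pv_chord_eq steno k h4]
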